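-- pv_equiv track=rewrite | github.com/cryzed/Faretricks | faretricks/fanficfare.py | _netloc_to_camelcase
-- ===== SOURCE A (Python) =====
-- import itertools
--
-- def _netloc_to_camelcase(netloc):
--     first_character = netloc[0].upper()
--     characters = [first_character]
--     previous_character = first_character
--
--     for character in itertools.islice(netloc, 1, None):
--         if previous_character == '.':
--             character = character.upper()
--
--         if character != '.':
--             characters.append(character)
--
--         previous_character = character
--     return ''.join(characters)
-- ===== SOURCE B (Python) =====
-- def _cap(seg):
--     return seg[:1].upper() + seg[1:]
--
--
-- def _netloc_to_camelcase(netloc):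
--     head = netloc[0].upper()
--     segments = netloc[1:].split('.')
--     first = _cap(segments[0]) if head == '.' else segments[0]
--     return head + first + ''.join(_cap(seg) for seg in segments[1:])
-- ===== Notes on version B (the rewrite author's own statement) =====
-- stated objective: simpler
-- what changed: Replaced A's character-by-character state machine (previous-character tracking, conditional uppercase, dot skipping) with splitting the tail of netloc on the dot separator and concatenating segments with capitalised heads, the first segment capitalised only when the leading character is the separator.
import Mathlib
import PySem

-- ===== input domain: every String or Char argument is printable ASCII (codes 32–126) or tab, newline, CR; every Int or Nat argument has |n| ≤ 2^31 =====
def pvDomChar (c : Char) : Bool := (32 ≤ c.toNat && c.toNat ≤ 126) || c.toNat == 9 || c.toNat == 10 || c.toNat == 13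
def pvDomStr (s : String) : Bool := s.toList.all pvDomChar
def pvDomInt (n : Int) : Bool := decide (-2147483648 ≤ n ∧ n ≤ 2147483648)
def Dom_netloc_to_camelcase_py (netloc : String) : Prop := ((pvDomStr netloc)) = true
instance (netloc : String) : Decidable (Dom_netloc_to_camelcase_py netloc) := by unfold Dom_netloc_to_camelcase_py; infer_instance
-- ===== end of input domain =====

-- B replaces A's char-by-char state machine by splitting the tail on '.' and
-- capitalising segment heads (objective: simpler; return value only, no mutation).

-- ===== PORT A =====
-- literal port of A: first char uppercased, then a fold carrying (characters, previous_character)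
-- the loop body of A: uppercase after a dot, append unless a dot, update previous_character
def pvStepA (st : List Char × Char) (ch : Char) : List Char × Char :=
  let ch := if st.2 = '.' then PySem.Chars.upperChar ch else ch
  ((if ch ≠ '.' then st.1 ++ [ch] else st.1), ch)

def netloc_to_camelcase_py (netloc : String) : String :=
  match netloc.toList with
  | [] => ""   -- Python raises IndexError on netloc[0]; excluded by Pre_
  | c :: rest =>
    let first := PySem.Chars.upperChar c
    let st := rest.foldl pvStepA ([first], first)
    String.ofList st.1

-- ===== PORT B =====
-- seg[:1].upper() + seg[1:]
def pvCapSeg (seg : List Char) : List Char :=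
  PySem.Chars.upper (seg.take 1) ++ seg.drop 1

def netloc_to_camelcase_py_alt (netloc : String) : String :=
  match netloc.toList with
  | [] => ""   -- Python raises IndexError on netloc[0]; excluded by Pre_
  | c :: rest =>
    let head := PySem.Chars.upperChar c
    match List.splitOn '.' rest with   -- netloc[1:].split('.')
    | [] => String.ofList [head]           -- unreachable: split is never empty
    | s0 :: segs =>
      let first := if head = '.' then pvCapSeg s0 else s0
      String.ofList (head :: (first ++ segs.flatMap pvCapSeg))

-- ===== PRECONDITION & SPEC =====
-- Pre_ excludes only the empty string, on which A raises IndexError (netloc[0]).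
def Pre_netloc_to_camelcase_py (netloc : String) : Prop := netloc ≠ ""
instance (netloc : String) : Decidable (Pre_netloc_to_camelcase_py netloc) := by unfold Pre_netloc_to_camelcase_py; infer_instance
def pvWitness_netloc_to_camelcase_py : String := "www.example.org"

def Spec_netloc_to_camelcase_py (netloc : String) (out : String) : Prop := out = netloc_to_camelcase_py_alt netloc
instance (netloc : String) (out : String) : Decidable (Spec_netloc_to_camelcase_py netloc out) := by unfold Spec_netloc_to_camelcase_py; infer_instance

-- ===== CLAIM (what is proved, stated in full; the proofs are below) =====
def Claim_equal_netloc_to_camelcase_py : Prop := ∀ (netloc : String), Dom_netloc_to_camelcase_py netloc → Pre_netloc_to_camelcase_py netloc → Spec_netloc_to_camelcase_py netloc (netloc_to_camelcase_py netloc)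

-- ===== LEMMAS AND PROOFS =====

-- A's loop body, as a pure recursion on the remaining characters given previous_character
def pvG : List Char → Char → List Char
  | [], _ => []
  | c :: cs, prev =>
    let c' := if prev = '.' then PySem.Chars.upperChar c else c
    if c' ≠ '.' then c' :: pvG cs c' else pvG cs c'

theorem pvSplitOn_ne_nil (cs : List Char) : List.splitOn '.' cs ≠ [] := by
  simp only [List.splitOn]
  exact List.splitOnP_ne_nil _ cs

theorem pvUpperChar_ne_dot (c : Char) (h : c ≠ '.') : PySem.Chars.upperChar c ≠ '.' := by
  simp only [PySem.Chars.upperChar, PySem.Chars.islower]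
  split_ifs with h1
  · rw [Bool.and_eq_true, decide_eq_true_iff, decide_eq_true_iff] at h1
    have h97 : ('a' : Char).toNat ≤ c.toNat := Fin.mk_le_mk.mp h1.1
    have h122 : c.toNat ≤ ('z' : Char).toNat := Fin.mk_le_mk.mp h1.2
    have ha : ('a' : Char).toNat = 97 := by decide
    have hz : ('z' : Char).toNat = 122 := by decide
    have hv : (Char.ofNat (c.toNat - 32)).toNat = c.toNat - 32 := by
      rw [Char.toNat_ofNat]
      have hval : (c.toNat - 32).isValidChar := by
        constructor
        omega
      simp [hval]
    intro he
    have h134 : (Char.ofNat (c.toNat - 32)).toNat = ('.' : Char).toNat := by rw [he]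
    have hdot : ('.' : Char).toNat = 46 := by decide
    omega
  · exact h

theorem pvUpperChar_dot : PySem.Chars.upperChar '.' = '.' := by decide

-- A's fold, from any accumulator/previous state, appends exactly pvG
theorem pvFoldA (cs : List Char) : ∀ (acc : List Char) (prev : Char),
    (cs.foldl pvStepA (acc, prev)).1 = acc ++ pvG cs prev := by
  induction cs with
  | nil => intro acc prev; simp [pvG]
  | cons c cs ih =>
    intro acc prev
    rw [List.foldl_cons]
    by_cases hc : (if prev = '.' then PySem.Chars.upperChar c else c) = '.'
    · have hstep : pvStepA (acc, prev) c = (acc, '.') := by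
        simp [pvStepA, hc]
      rw [hstep, ih]
      have hg : pvG (c :: cs) prev = pvG cs '.' := by
        rw [show pvG (c :: cs) prev = (if (if prev = '.' then PySem.Chars.upperChar c else c) ≠ '.' then
              (if prev = '.' then PySem.Chars.upperChar c else c) ::
                pvG cs (if prev = '.' then PySem.Chars.upperChar c else c)
            else pvG cs (if prev = '.' then PySem.Chars.upperChar c else c)) from rfl]
        simp [hc]
      rw [hg]
    · have hstep : pvStepA (acc, prev) c =
          (acc ++ [if prev = '.' then PySem.Chars.upperChar c else c],
           if prev = '.' then PySem.Chars.upperChar c else c) := by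
        simp [pvStepA, hc]
      rw [hstep, ih]
      have hg : pvG (c :: cs) prev = (if prev = '.' then PySem.Chars.upperChar c else c) ::
          pvG cs (if prev = '.' then PySem.Chars.upperChar c else c) := by
        rw [show pvG (c :: cs) prev = (if (if prev = '.' then PySem.Chars.upperChar c else c) ≠ '.' then
              (if prev = '.' then PySem.Chars.upperChar c else c) ::
                pvG cs (if prev = '.' then PySem.Chars.upperChar c else c)
            else pvG cs (if prev = '.' then PySem.Chars.upperChar c else c)) from rfl]
        simp [hc]
      rw [hg]
      simp

-- pvG equals B's split-and-capitalise construction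
theorem pvG_split (cs : List Char) : ∀ (prev : Char),
    pvG cs prev = (match List.splitOn '.' cs with
      | [] => []
      | s0 :: segs => (if prev = '.' then pvCapSeg s0 else s0) ++ segs.flatMap pvCapSeg) := by
  induction cs with
  | nil =>
    intro prev
    simp [pvG, List.splitOn_nil, pvCapSeg, PySem.Chars.upper]
  | cons c cs ih =>
    intro prev
    by_cases hc : c = '.'
    · subst hc
      have hsplit : List.splitOn '.' ('.' :: cs) = [] :: List.splitOn '.' cs := by
        simp [List.splitOn, List.splitOnP_cons]
      have hg : pvG ('.' :: cs) prev = pvG cs '.' := by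
        by_cases hp : prev = '.'
        · simp [pvG, hp, pvUpperChar_dot]
        · simp [pvG, hp]
      rw [hg, ih '.', hsplit]
      cases h : List.splitOn '.' cs with
      | nil => exact absurd h (pvSplitOn_ne_nil cs)
      | cons s0 segs => simp [pvCapSeg, PySem.Chars.upper]
    · have hsplit : List.splitOn '.' (c :: cs) =
          (List.splitOn '.' cs).modifyHead (List.cons c) := by
        simp [List.splitOn, List.splitOnP_cons, hc]
      cases h : List.splitOn '.' cs with
      | nil => exact absurd h (pvSplitOn_ne_nil cs)
      | cons s0 segs =>
        rw [hsplit, h]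
        simp only [List.modifyHead]
        by_cases hp : prev = '.'
        · subst hp
          have hu := pvUpperChar_ne_dot c hc
          have hg : pvG (c :: cs) '.' = PySem.Chars.upperChar c :: pvG cs (PySem.Chars.upperChar c) := by
            simp [pvG, hu]
          rw [hg, ih (PySem.Chars.upperChar c), h]
          simp [hu, pvCapSeg, PySem.Chars.upper]
        · have hg : pvG (c :: cs) prev = c :: pvG cs c := by
            simp [pvG, hp, hc]
          rw [hg, ih c, h]
          simp [hp, hc]

-- ===== VERDICT (by name: the statement is the Claim_ definition above) =====
theorem netloc_to_camelcase_py_spec : Claim_equal_netloc_to_camelcase_py := by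
  intro netloc _hdom hpre
  unfold Spec_netloc_to_camelcase_py netloc_to_camelcase_py netloc_to_camelcase_py_alt
  cases h : netloc.toList with
  | nil =>
    exact absurd (String.toList_eq_nil_iff.mp h) hpre
  | cons c rest =>
    simp only
    rw [pvFoldA, pvG_split]
    cases hs : List.splitOn '.' rest with
    | nil => exact absurd hs (pvSplitOn_ne_nil rest)
    | cons s0 segs =>
      by_cases hp : PySem.Chars.upperChar c = '.'
      · simp [hp]
      · simp [hp]
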